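-- pv_equiv track=rewrite | github.com/indianaorz/Scriptable-OpenNetBattle-Server | fix_patch_headers.py | fix_patch_headers
-- ===== SOURCE A (Python) =====
-- def fix_patch_headers(patch_lines):
--     fixed_lines = []
--     i = 0
--     while i < len(patch_lines):
--         line = patch_lines[i]
--         fixed_lines.append(line)
--
--         if line.startswith("diff --git"):
--             parts = line.strip().split()
--             if len(parts) == 4:
--                 _, _, a_path, b_path = parts
--                 current_a = a_path[2:]
--                 current_b = b_path[2:]
--
--             # Track metadata
--             new_file = False
--             has_old = False
--             has_new = False
--
--             j = i + 1
--             insert_at = len(fixed_lines)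
--             while j < len(patch_lines):
--                 subline = patch_lines[j]
--                 if subline.startswith("diff --git"):
--                     break
--                 if subline.startswith("new file mode"):
--                     new_file = True
--                 if subline.startswith("---"):
--                     has_old = True
--                 if subline.startswith("+++"):
--                     has_new = True
--                 if subline.startswith("@@"):
--                     break
--                 j += 1
--
--             # Fix missing headers
--             if not has_old:
--                 fixed_lines.insert(insert_at, "--- /dev/null\n" if new_file else f"--- a/{current_a}\n")
--             if not has_new:
--                 fixed_lines.insert(insert_at + 1, f"+++ b/{current_b}\n")
--
--         i += 1
--     return fixed_lines
-- ===== SOURCE B (Python) =====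
-- def fix_patch_headers(patch_lines):
--     # stage 1: group the lines into a preamble plus sections, each section
--     # starting with its own 'diff --git' line (no header logic here)
--     sections = [[]]
--     for line in patch_lines:
--         if line.startswith("diff --git"):
--             sections.append([line])
--         else:
--             sections[-1].append(line)
--     # stage 2: emit the preamble, then each section with its missing headers
--     # synthesized right after the 'diff --git' line
--     out = sections[0]
--     cur = None  # (a_path, b_path); left unset until a 4-field diff line appears
--     for sec in sections[1:]:
--         parts = sec[0].strip().split()
--         if len(parts) == 4:
--             cur = (parts[2][2:], parts[3][2:])
--         body = sec[1:]
--         head = body[:next((j for j, l in enumerate(body) if l.startswith("@@")), len(body))]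
--         headers = []
--         if not any(l.startswith("---") for l in head):
--             headers.append("--- /dev/null\n"
--                            if any(l.startswith("new file mode") for l in head)
--                            else f"--- a/{cur[0]}\n")
--         if not any(l.startswith("+++") for l in head):
--             headers.append(f"+++ b/{cur[1]}\n")
--         out = out + [sec[0]] + headers + body
--     return out
-- ===== Notes on version B (the rewrite author's own statement) =====
-- stated objective: alternative
-- what changed: A is one cursor loop that, at each 'diff --git' line, runs a nested flag-accumulating lookahead over the following lines and then re-walks those same lines in the outer loop, splicing headers in with list.insert; B is two staged passes: pass 1 groups the lines into a preamble plus per-diff sections with no header logic at all, pass 2 maps over the section list with a carried (a,b)-path accumulator, computing the flags declaratively with any() over the slice of the section before its first '@@' and emitting each section wholesale with its synthesized headers.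
import Mathlib
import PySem

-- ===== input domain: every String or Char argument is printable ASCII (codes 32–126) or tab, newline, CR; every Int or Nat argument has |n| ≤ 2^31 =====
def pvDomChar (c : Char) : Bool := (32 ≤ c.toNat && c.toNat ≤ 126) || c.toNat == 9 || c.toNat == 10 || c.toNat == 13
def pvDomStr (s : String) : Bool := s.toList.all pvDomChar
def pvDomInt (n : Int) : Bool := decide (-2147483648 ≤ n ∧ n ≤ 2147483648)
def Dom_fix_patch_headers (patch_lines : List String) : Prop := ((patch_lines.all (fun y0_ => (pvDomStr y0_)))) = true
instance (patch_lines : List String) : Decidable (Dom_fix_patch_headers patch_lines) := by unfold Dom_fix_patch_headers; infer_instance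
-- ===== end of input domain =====

-- B replaces A's cursor-with-lookahead-and-insert by two staged passes: group the lines into
-- per-diff sections, then map over the section list synthesizing the missing headers (objective: alternative).

-- ===== PORT A =====
-- A's inner j-loop: scans lines after a 'diff --git' line without consuming them, carrying the flags
def aScan : List String → Bool → Bool → Bool → Bool × Bool × Bool
  | [], nf, ho, hn => (nf, ho, hn)
  | s :: rest, nf, ho, hn =>
    if PySem.Str.startswith s "diff --git" then (nf, ho, hn)
    else
      let nf := nf || PySem.Str.startswith s "new file mode"
      let ho := ho || PySem.Str.startswith s "---"
      let hn := hn || PySem.Str.startswith s "+++"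
      if PySem.Str.startswith s "@@" then (nf, ho, hn)
      else aScan rest nf ho hn

-- A's outer while-loop over i, one line per step; cur models current_a/current_b (none = unset:
-- there Python raises NameError when the value is demanded — excluded by Pre_; "" stands in outside Pre_)
def aLoop : List String → List String → Option (String × String) → List String
  | [], acc, _ => acc
  | line :: rs, acc, cur =>
    let acc := acc ++ [line]
    if PySem.Str.startswith line "diff --git" then
      let parts := PySem.Str.split₀ (PySem.Str.strip line)
      let cur := if parts.length == 4 then
          some (PySem.Str.slice (parts.getD 2 "") (some 2) none,
                PySem.Str.slice (parts.getD 3 "") (some 2) none)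
        else cur
      let fl := aScan rs false false false
      let nf := fl.1; let ho := fl.2.1; let hn := fl.2.2
      let insert_at : Int := acc.length
      let acc := if !ho then
          PySem.List.insert acc insert_at
            (if nf then "--- /dev/null\n" else "--- a/" ++ (cur.getD ("", "")).1 ++ "\n")
        else acc
      let acc := if !hn then
          PySem.List.insert acc (insert_at + 1) ("+++ b/" ++ (cur.getD ("", "")).2 ++ "\n")
        else acc
      aLoop rs acc cur
    else aLoop rs acc cur

def fix_patch_headers (patch_lines : List String) : List String :=
  aLoop patch_lines [] none

-- ===== PORT B =====
-- B stage 1: the grouping loop — a new section at each 'diff --git' line, other lines appended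
-- to the last section (sections[-1].append)
def bGroupStep (secs : List (List String)) (line : String) : List (List String) :=
  if PySem.Str.startswith line "diff --git" then secs ++ [[line]]
  else secs.dropLast ++ [secs.getLastD [] ++ [line]]

def bGroup (patch_lines : List String) : List (List String) :=
  patch_lines.foldl bGroupStep [[]]

-- B stage 2, one section: sec[0] is its 'diff --git' line (sections after the preamble are never
-- empty, so headD "" is Python's sec[0]); head = body up to the first '@@' (findIdx = next(...)
-- with default len(body)); flags are any() over head; cur is the carried (a_path, b_path)
def bStep (st : List String × Option (String × String)) (sec : List String) :
    List String × Option (String × String) :=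
  let d := sec.headD ""
  let body := sec.tail
  let parts := PySem.Str.split₀ (PySem.Str.strip d)
  let cur := if parts.length == 4 then
      some (PySem.Str.slice (parts.getD 2 "") (some 2) none,
            PySem.Str.slice (parts.getD 3 "") (some 2) none)
    else st.2
  let head := body.take (body.findIdx (fun l => PySem.Str.startswith l "@@"))
  let headers :=
    (if !(head.any (fun l => PySem.Str.startswith l "---")) then
       [if head.any (fun l => PySem.Str.startswith l "new file mode") then "--- /dev/null\n"
        else "--- a/" ++ (cur.getD ("", "")).1 ++ "\n"]
     else []) ++
    (if !(head.any (fun l => PySem.Str.startswith l "+++")) then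
       ["+++ b/" ++ (cur.getD ("", "")).2 ++ "\n"]
     else [])
  (st.1 ++ [d] ++ headers ++ body, cur)

def fix_patch_headers_alt (patch_lines : List String) : List String :=
  let secs := bGroup patch_lines
  ((secs.tail).foldl bStep (secs.headD [], none)).1

-- ===== PRECONDITION & SPEC =====
-- flags of the section body following a 'diff --git' line, stated declaratively
def preFlags (ls : List String) : Bool × Bool × Bool :=
  let body := ls.takeWhile (fun s => !(PySem.Str.startswith s "@@" || PySem.Str.startswith s "diff --git"))
  (body.any (fun s => PySem.Str.startswith s "new file mode"),
   body.any (fun s => PySem.Str.startswith s "---"),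
   body.any (fun s => PySem.Str.startswith s "+++"))

-- hav = some 'diff --git' line so far had exactly 4 whitespace fields (current_a/current_b set)
def preOk : List String → Bool → Bool
  | [], _ => true
  | line :: rs, hav =>
    if PySem.Str.startswith line "diff --git" then
      let hav := hav || ((PySem.Str.split₀ (PySem.Str.strip line)).length == 4)
      let fl := preFlags rs
      if ((!fl.2.1 && !fl.1) || !fl.2.2) && !hav then false else preOk rs hav
    else preOk rs hav

-- Pre_ excludes exactly the inputs on which A raises NameError: a section needs a header inserted
-- while no 'diff --git' line seen so far had 4 whitespace fields (current_a/current_b never assigned).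
def Pre_fix_patch_headers (patch_lines : List String) : Prop :=
  preOk patch_lines false = true
instance (patch_lines : List String) : Decidable (Pre_fix_patch_headers patch_lines) := by
  unfold Pre_fix_patch_headers; infer_instance

def pvWitness_fix_patch_headers : List String :=
  ["diff --git a/x b/x\n", "index 12..34\n", "@@ -1 +1 @@\n", "+hi\n"]

def Spec_fix_patch_headers (patch_lines : List String) (out : List String) : Prop := out = fix_patch_headers_alt patch_lines
instance (patch_lines : List String) (out : List String) : Decidable (Spec_fix_patch_headers patch_lines out) := by unfold Spec_fix_patch_headers; infer_instance

-- ===== CLAIM (what is proved, stated in full; the proofs are below) =====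
def Claim_equal_fix_patch_headers : Prop := ∀ (patch_lines : List String), Dom_fix_patch_headers patch_lines → Pre_fix_patch_headers patch_lines → Spec_fix_patch_headers patch_lines (fix_patch_headers patch_lines)

-- ===== LEMMAS AND PROOFS =====

-- a line starting with "@@" starts with none of the three metadata prefixes
theorem at_disj (s : String) (h : PySem.Str.startswith s "@@" = true) :
    PySem.Str.startswith s "new file mode" = false ∧
    PySem.Str.startswith s "---" = false ∧
    PySem.Str.startswith s "+++" = false := by
  simp only [PySem.Str.startswith] at h ⊢
  rw [PySem.Chars.startswith_iff] at h
  obtain ⟨t, ht⟩ := h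
  have hs : s.toList = '@' :: '@' :: t := by simpa using ht.symm
  refine ⟨?_, ?_, ?_⟩ <;>
    · rw [← Bool.not_eq_true, PySem.Chars.startswith_iff, hs]
      intro hp
      obtain ⟨u, hu⟩ := hp
      simp at hu

-- proof-side reference recursion: one section at a time (the common shape both ports are reduced to)
def sSection : List String → Bool → Bool → Bool → List String × Bool × Bool × Bool × List String
  | [], nf, ho, hn => ([], nf, ho, hn, [])
  | s :: rest, nf, ho, hn =>
    if PySem.Str.startswith s "@@" || PySem.Str.startswith s "diff --git" then
      ([], nf, ho, hn, s :: rest)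
    else
      let r := sSection rest (nf || PySem.Str.startswith s "new file mode")
                            (ho || PySem.Str.startswith s "---")
                            (hn || PySem.Str.startswith s "+++")
      (s :: r.1, r.2.1, r.2.2.1, r.2.2.2.1, r.2.2.2.2)

theorem sSection_rest_le : ∀ (ls : List String) (nf ho hn : Bool),
    (sSection ls nf ho hn).2.2.2.2.length ≤ ls.length := by
  intro ls
  induction ls with
  | nil => intro nf ho hn; simp [sSection]
  | cons s rest ih =>
    intro nf ho hn
    simp only [sSection]
    split
    · simp
    · have := ih (nf || PySem.Str.startswith s "new file mode")
        (ho || PySem.Str.startswith s "---") (hn || PySem.Str.startswith s "+++")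
      simpa using Nat.le_succ_of_le this

def sLoop : List String → Option (String × String) → List String
  | [], _ => []
  | line :: rs, cur =>
    if PySem.Str.startswith line "diff --git" then
      let parts := PySem.Str.split₀ (PySem.Str.strip line)
      let cur := if parts.length == 4 then
          some (PySem.Str.slice (parts.getD 2 "") (some 2) none,
                PySem.Str.slice (parts.getD 3 "") (some 2) none)
        else cur
      let r := sSection rs false false false
      line ::
        ((if !r.2.2.1 then
            [if r.2.1 then "--- /dev/null\n" else "--- a/" ++ (cur.getD ("", "")).1 ++ "\n"]
          else []) ++
         (if !r.2.2.2.1 then ["+++ b/" ++ (cur.getD ("", "")).2 ++ "\n"] else []) ++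
         r.1 ++ sLoop r.2.2.2.2 cur)
    else line :: sLoop rs cur
  termination_by ls _ => ls.length
  decreasing_by
    · exact Nat.lt_succ_of_le (sSection_rest_le rs false false false)
    · simp

-- aScan computes the same flags as sSection
theorem aScan_eq_sSection : ∀ (ls : List String) (nf ho hn : Bool),
    aScan ls nf ho hn =
      ((sSection ls nf ho hn).2.1, (sSection ls nf ho hn).2.2.1, (sSection ls nf ho hn).2.2.2.1) := by
  intro ls
  induction ls with
  | nil => intro nf ho hn; simp [aScan, sSection]
  | cons s rest ih =>
    intro nf ho hn
    by_cases hd : PySem.Str.startswith s "diff --git" = true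
    · have hb : (PySem.Str.startswith s "@@" || PySem.Str.startswith s "diff --git") = true := by
        rw [hd, Bool.or_true]
      simp only [aScan, sSection, if_pos hd, if_pos hb]
    · by_cases ha : PySem.Str.startswith s "@@" = true
      · obtain ⟨h1, h2, h3⟩ := at_disj s ha
        have hb : (PySem.Str.startswith s "@@" || PySem.Str.startswith s "diff --git") = true := by
          rw [ha, Bool.true_or]
        simp only [aScan, sSection, if_neg hd, if_pos ha, if_pos hb, h1, h2, h3, Bool.or_false]
      · have hb : ¬ ((PySem.Str.startswith s "@@" || PySem.Str.startswith s "diff --git") = true) := by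
          intro hc
          rw [Bool.or_eq_true] at hc
          exact hc.elim ha hd
        simp only [aScan, sSection, if_neg hd, if_neg ha, if_neg hb]
        exact ih _ _ _

-- sSection splits its input into body ++ rest
theorem sSection_split : ∀ (ls : List String) (nf ho hn : Bool),
    (sSection ls nf ho hn).1 ++ (sSection ls nf ho hn).2.2.2.2 = ls := by
  intro ls
  induction ls with
  | nil => intro nf ho hn; simp [sSection]
  | cons s rest ih =>
    intro nf ho hn
    simp only [sSection]
    split
    · simp
    · simpa using ih _ _ _

-- no body line starts with "diff --git"
theorem sSection_body_not_diff : ∀ (ls : List String) (nf ho hn : Bool),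
    ∀ x ∈ (sSection ls nf ho hn).1, PySem.Str.startswith x "diff --git" = false := by
  intro ls
  induction ls with
  | nil => intro nf ho hn x hx; simp [sSection] at hx
  | cons s rest ih =>
    intro nf ho hn x hx
    simp only [sSection] at hx
    split at hx
    · simp at hx
    · rename_i hcond
      simp only [List.mem_cons] at hx
      rcases hx with rfl | hx
      · simp only [Bool.or_eq_true, not_or, Bool.not_eq_true] at hcond
        exact hcond.2
      · exact ih _ _ _ x hx

-- A's outer loop just appends lines that do not start with "diff --git"
theorem aLoop_skip : ∀ (sec rest acc : List String) (cur : Option (String × String)),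
    (∀ x ∈ sec, PySem.Str.startswith x "diff --git" = false) →
    aLoop (sec ++ rest) acc cur = aLoop rest (acc ++ sec) cur := by
  intro sec
  induction sec with
  | nil => intro rest acc cur _; simp
  | cons s tl ih =>
    intro rest acc cur h
    have hs : PySem.Str.startswith s "diff --git" = false := h s (by simp)
    have htl : ∀ x ∈ tl, PySem.Str.startswith x "diff --git" = false :=
      fun x hx => h x (by simp [hx])
    simp only [List.cons_append, aLoop, hs, Bool.false_eq_true, if_false]
    rw [ih rest (acc ++ [s]) cur htl]
    simp

-- Python list.insert at (or past) the end is an append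
theorem insert_ge_len {α : Type} (xs : List α) (i : Int) (v : α) (h : (xs.length : Int) ≤ i) :
    PySem.List.insert xs i v = xs ++ [v] := by
  simp only [PySem.List.insert, PySem.List.sliceIndices]
  simp only [if_neg (show ¬ i < 0 by omega), if_neg (show ¬ ((1:Int) < 0) by norm_num)]
  have hk : (min i (xs.length : Int)).toNat = xs.length := by omega
  rw [hk]
  simp

-- A-side invariant: A's accumulator loop equals acc ++ the reference recursion
theorem aLoop_eq_sLoop : ∀ (n : Nat) (ls acc : List String) (cur : Option (String × String)),
    ls.length ≤ n → aLoop ls acc cur = acc ++ sLoop ls cur := by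
  intro n
  induction n with
  | zero =>
    intro ls acc cur h
    have : ls = [] := List.eq_nil_of_length_eq_zero (Nat.le_zero.mp h)
    subst this; simp [aLoop, sLoop]
  | succ n ih =>
    intro ls acc cur h
    match ls with
    | [] => simp [aLoop, sLoop]
    | line :: rs =>
      by_cases hd : PySem.Str.startswith line "diff --git" = true
      · have hlen : rs.length ≤ n := by
          simpa using Nat.lt_succ_iff.mp (by simpa using h)
        simp only [aLoop, sLoop, if_pos hd]
        rw [aScan_eq_sSection]
        rcases hB : sSection rs false false false with ⟨sec, nf, ho, hn, rest'⟩
        have hsplit := sSection_split rs false false false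
        have hnd := sSection_body_not_diff rs false false false
        have hrest := sSection_rest_le rs false false false
        rw [hB] at hsplit hnd hrest
        dsimp only at hsplit hnd hrest ⊢
        cases ho <;> cases hn <;>
          simp only [Bool.not_false, Bool.not_true, Bool.false_eq_true, reduceIte]
        · rw [insert_ge_len _ _ _ (le_refl _), insert_ge_len _ _ _ (by simp; omega)]
          rw [← hsplit, aLoop_skip sec rest' _ _ hnd, ih rest' _ _ (le_trans hrest hlen)]
          simp
        · rw [insert_ge_len _ _ _ (le_refl _)]
          rw [← hsplit, aLoop_skip sec rest' _ _ hnd, ih rest' _ _ (le_trans hrest hlen)]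
          simp
        · rw [insert_ge_len _ _ _ (by simp)]
          rw [← hsplit, aLoop_skip sec rest' _ _ hnd, ih rest' _ _ (le_trans hrest hlen)]
          simp
        · rw [← hsplit, aLoop_skip sec rest' _ _ hnd, ih rest' _ _ (le_trans hrest hlen)]
          simp
      · simp only [aLoop, sLoop, if_neg hd]
        rw [ih rs (acc ++ [line]) cur (by simpa using Nat.lt_succ_iff.mp (by simpa using h))]
        simp

-- ===== B side =====

-- sSection characterized by takeWhile/any/drop
theorem sSection_char : ∀ (ls : List String) (nf ho hn : Bool),
    sSection ls nf ho hn =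
      (ls.takeWhile (fun s => !(PySem.Str.startswith s "@@" || PySem.Str.startswith s "diff --git")),
       nf || (ls.takeWhile (fun s => !(PySem.Str.startswith s "@@" || PySem.Str.startswith s "diff --git"))).any (fun s => PySem.Str.startswith s "new file mode"),
       ho || (ls.takeWhile (fun s => !(PySem.Str.startswith s "@@" || PySem.Str.startswith s "diff --git"))).any (fun s => PySem.Str.startswith s "---"),
       hn || (ls.takeWhile (fun s => !(PySem.Str.startswith s "@@" || PySem.Str.startswith s "diff --git"))).any (fun s => PySem.Str.startswith s "+++"),
       ls.drop (ls.takeWhile (fun s => !(PySem.Str.startswith s "@@" || PySem.Str.startswith s "diff --git"))).length) := by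
  intro ls
  induction ls with
  | nil => intro nf ho hn; simp [sSection]
  | cons s rest ih =>
    intro nf ho hn
    by_cases hstop : (PySem.Str.startswith s "@@" || PySem.Str.startswith s "diff --git") = true
    · simp only [sSection, List.takeWhile_cons, hstop, Bool.not_true,
        Bool.false_eq_true, if_false]
      simp
    · rw [Bool.not_eq_true] at hstop
      simp only [sSection, hstop, Bool.false_eq_true, if_false, List.takeWhile_cons,
        Bool.not_false, ih]
      simp [Bool.or_assoc]

-- take up to findIdx is takeWhile of the negation
theorem take_findIdx_eq_takeWhile {α : Type} (l : List α) (p : α → Bool) :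
    l.take (l.findIdx p) = l.takeWhile (fun x => !p x) := by
  induction l with
  | nil => rfl
  | cons a t ih => by_cases h : p a <;> simp [List.findIdx_cons, h, ih]

-- boolean identity used to align the two head predicates
theorem bool_and_not (a b : Bool) : (decide ((!a) = true ∧ (!b) = true)) = !(a || b) := by
  cases a <;> cases b <;> rfl

-- head of dropWhile does not satisfy the predicate
theorem head_dropWhile_false {α : Type} (l : List α) (p : α → Bool) (x : α) (t : List α)
    (h : l.dropWhile p = x :: t) : p x = false := by
  have := List.head_dropWhile_not p (l := l) (by simp [h])
  simpa [h] using this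

-- sLoop passes non-diff lines straight through
theorem sLoop_skip : ∀ (u r : List String) (cur : Option (String × String)),
    (∀ x ∈ u, PySem.Str.startswith x "diff --git" = false) →
    sLoop (u ++ r) cur = u ++ sLoop r cur := by
  intro u
  induction u with
  | nil => intro r cur _; simp
  | cons s tl ih =>
    intro r cur h
    have hs : PySem.Str.startswith s "diff --git" = false := h s (by simp)
    rw [List.cons_append, sLoop]
    simp only [hs, Bool.false_eq_true, if_false]
    rw [ih r cur (fun x hx => h x (by simp [hx]))]
    simp

-- stage-1 grouping characterized: the trailing sections of the lines after the preamble
def tailSecs : List String → List (List String)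
  | [] => []
  | l :: rest =>
    (l :: rest.takeWhile (fun s => !PySem.Str.startswith s "diff --git")) ::
      tailSecs (rest.dropWhile (fun s => !PySem.Str.startswith s "diff --git"))
  termination_by ls => ls.length
  decreasing_by
    exact Nat.lt_succ_of_le (List.length_dropWhile_le _ _)

theorem bGroup_fold_char : ∀ (ls : List String) (init : List (List String)) (c : List String),
    ls.foldl bGroupStep (init ++ [c]) =
      init ++ (c ++ ls.takeWhile (fun s => !PySem.Str.startswith s "diff --git")) ::
        tailSecs (ls.dropWhile (fun s => !PySem.Str.startswith s "diff --git")) := by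
  intro ls
  induction ls with
  | nil => intro init c; simp [tailSecs]
  | cons l rest ih =>
    intro init c
    rw [List.foldl_cons]
    by_cases hd : PySem.Str.startswith l "diff --git" = true
    · have hstep : bGroupStep (init ++ [c]) l = (init ++ [c]) ++ [[l]] := by
        unfold bGroupStep; rw [if_pos hd]
      rw [hstep, ih (init ++ [c]) [l]]
      rw [List.takeWhile_cons, List.dropWhile_cons]
      simp only [hd, Bool.not_true, Bool.false_eq_true, if_false]
      rw [tailSecs]
      simp
    · rw [Bool.not_eq_true] at hd
      have hstep : bGroupStep (init ++ [c]) l = init ++ [c ++ [l]] := by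
        unfold bGroupStep
        rw [if_neg (by rw [hd]; exact Bool.false_ne_true)]
        simp
      rw [hstep, ih init (c ++ [l])]
      rw [List.takeWhile_cons, List.dropWhile_cons]
      simp only [hd, Bool.not_false, if_true]
      simp

-- stage-2 fold over the trailing sections equals the reference recursion
theorem foldl_bStep_eq_sLoop : ∀ (n : Nat) (ls out : List String) (cur : Option (String × String)),
    ls.length ≤ n →
    (ls = [] ∨ ∃ d rest, ls = d :: rest ∧ PySem.Str.startswith d "diff --git" = true) →
    ((tailSecs ls).foldl bStep (out, cur)).1 = out ++ sLoop ls cur := by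
  intro n
  induction n with
  | zero =>
    intro ls out cur h _
    have : ls = [] := List.eq_nil_of_length_eq_zero (Nat.le_zero.mp h)
    subst this; simp [tailSecs, sLoop]
  | succ n ih =>
    intro ls out cur h hshape
    rcases hshape with rfl | ⟨d, rest, rfl, hd⟩
    · simp [tailSecs, sLoop]
    · have hlen : rest.length ≤ n := by
        simpa using Nat.lt_succ_iff.mp (by simpa using h)
      set pd := fun s => !PySem.Str.startswith s "diff --git" with hpd
      set t := rest.takeWhile pd with ht
      set r := rest.dropWhile pd with hr
      -- unfold one tailSecs section and one bStep
      rw [tailSecs]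
      rw [List.foldl_cons]
      -- the section's head slice
      have hhead : t.take (t.findIdx (fun l => PySem.Str.startswith l "@@"))
          = rest.takeWhile (fun s => !(PySem.Str.startswith s "@@" || PySem.Str.startswith s "diff --git")) := by
        rw [take_findIdx_eq_takeWhile, ht, List.takeWhile_takeWhile]
        congr 1
        funext s
        simp only [hpd]
        exact bool_and_not _ _
      set h0 := rest.takeWhile (fun s => !(PySem.Str.startswith s "@@" || PySem.Str.startswith s "diff --git")) with hh0
      -- h0 is a prefix of t: t = h0 ++ u
      obtain ⟨u, hu⟩ := List.take_prefix (t.findIdx fun l => PySem.Str.startswith l "@@") t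
      rw [hhead] at hu
      have hulen : t.drop h0.length = u := by
        conv_lhs => rw [← hu]
        simp
      -- rest splits as t ++ r, and drop h0.length lands inside t
      have hrest_split : rest = t ++ r := (List.takeWhile_append_dropWhile).symm
      have hdrop : rest.drop h0.length = u ++ r := by
        conv_lhs => rw [hrest_split, ← hu, List.append_assoc]
        simp
      -- all of t (hence u) is non-diff
      have ht_nd : ∀ x ∈ t, PySem.Str.startswith x "diff --git" = false := by
        intro x hx
        have := List.mem_takeWhile_imp (ht ▸ hx)
        simpa [hpd] using this
      have hu_nd : ∀ x ∈ u, PySem.Str.startswith x "diff --git" = false := by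
        intro x hx
        exact ht_nd x (by rw [← hu]; exact List.mem_append_right _ hx)
      -- r is empty or starts with a diff line
      have hr_shape : r = [] ∨ ∃ d' rest', r = d' :: rest' ∧ PySem.Str.startswith d' "diff --git" = true := by
        cases hre : r with
        | nil => exact Or.inl rfl
        | cons x xs =>
          refine Or.inr ⟨x, xs, rfl, ?_⟩
          have hdw : rest.dropWhile pd = x :: xs := by rw [← hr]; exact hre
          have h2 := head_dropWhile_false rest pd x xs hdw
          rw [hpd] at h2
          simpa using h2
      have hr_len : r.length ≤ n := le_trans (hr ▸ List.length_dropWhile_le _ _) hlen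
      -- compute the two sides
      rw [ih r _ _ hr_len hr_shape]
      rw [sLoop]
      simp only [hd]
      rw [sSection_char]
      simp only [bStep, List.headD_cons, List.tail_cons, Bool.false_or]
      rw [hhead, ← hh0]
      -- align the remainder: sLoop (rest.drop h0.length) = t.drop h0.length ++ sLoop r
      rw [hdrop, sLoop_skip _ _ _ hu_nd]
      -- both sides are out ++ d :: headers ++ (h0 ++ u = t) ++ sLoop r cur'
      have hu' : h0 ++ u = List.takeWhile (fun s => !PySem.Str.startswith s "diff --git") rest := by
        rw [hu, ht, hpd]
      rw [← hu']
      simp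

-- ===== VERDICT (by name: the statement is the Claim_ definition above) =====
theorem fix_patch_headers_spec : Claim_equal_fix_patch_headers := by
  intro patch_lines _ _
  unfold Spec_fix_patch_headers fix_patch_headers fix_patch_headers_alt
  rw [aLoop_eq_sLoop patch_lines.length patch_lines [] none le_rfl]
  rw [show bGroup patch_lines = patch_lines.foldl bGroupStep ([] ++ [[]]) from rfl,
      bGroup_fold_char]
  simp only [List.nil_append, List.headD_cons, List.tail_cons]
  rw [foldl_bStep_eq_sLoop (patch_lines.dropWhile (fun s => !PySem.Str.startswith s "diff --git")).length _ _ none le_rfl]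
  · have hnd : ∀ x ∈ patch_lines.takeWhile (fun s => !PySem.Str.startswith s "diff --git"),
        PySem.Str.startswith x "diff --git" = false := by
      intro x hx
      have := List.mem_takeWhile_imp hx
      simpa using this
    rw [← sLoop_skip _ _ none hnd, List.takeWhile_append_dropWhile]
  · cases hre : patch_lines.dropWhile (fun s => !PySem.Str.startswith s "diff --git") with
    | nil => exact Or.inl rfl
    | cons x xs =>
      refine Or.inr ⟨x, xs, rfl, ?_⟩
      have := head_dropWhile_false patch_lines _ x xs hre
      simpa using this
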